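-- pv_equiv track=rewrite | github.com/leonardogavaudan/leetcapital | 1915. Number of Wonderful Substrings/python/v2.py | wonderfulSubstrings
-- ===== SOURCE A (Python) =====
-- def wonderfulSubstrings(word: str) -> int:
--     res = 0
--     char_count = {}
--     odd_count = 0
--
--     for i in range(len(word)):
--         original_char_count = char_count.copy()
--         original_odd_count = 0
--
--         for j in range(i, len(word)):
--             if word[j] not in char_count:
--                 char_count[word[j]] = 0
--
--             char_count[word[j]] += 1
--
--             if char_count[word[j]] % 2 == 0:
--                 odd_count -= 1
--             else:
--                 odd_count += 1
--
--             if odd_count < 2: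
--                 res += 1
--
--         char_count = original_char_count
--         odd_count = original_odd_count
--
--     return res
-- ===== SOURCE B (Python) =====
-- def wonderfulSubstrings(word: str) -> int:
--     alphabet = set(word)
--     counts = {0: 1}
--     mask = 0
--     res = 0
--     for ch in word:
--         mask ^= 1 << ord(ch)
--         res += counts.get(mask, 0)
--         for c in alphabet:
--             res += counts.get(mask ^ (1 << ord(c)), 0)
--         counts[mask] = counts.get(mask, 0) + 1
--     return res
-- ===== Notes on version B (the rewrite author's own statement) =====
-- stated objective: faster
-- what changed: replaced the restart-at-every-index nested scan (re-counting character parities for each start) with a single pass keeping a prefix parity bitmask and a hashmap of mask frequencies, adding for each position the counts of the current mask and of each mask one alphabet-bit away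
import Mathlib
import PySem

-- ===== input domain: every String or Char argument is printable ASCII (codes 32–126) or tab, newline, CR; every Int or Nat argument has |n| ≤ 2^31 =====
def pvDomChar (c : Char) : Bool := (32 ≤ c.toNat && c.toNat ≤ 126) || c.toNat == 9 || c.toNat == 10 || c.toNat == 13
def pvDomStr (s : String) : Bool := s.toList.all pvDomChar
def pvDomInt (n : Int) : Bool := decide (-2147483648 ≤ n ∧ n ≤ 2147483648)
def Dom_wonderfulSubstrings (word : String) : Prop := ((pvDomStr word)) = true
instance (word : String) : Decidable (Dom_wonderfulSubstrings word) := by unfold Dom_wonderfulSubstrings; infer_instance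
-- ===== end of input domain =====

-- B replaces A's restart-at-every-start nested scan by a single pass over the string keeping a
-- prefix parity bitmask and a hashmap counting how often each mask occurred (objective: faster).

-- ===== PORT A =====
-- A's inner-loop body, applied to the character word[j]: ensure the dict has the key, increment it,
-- update odd_count by the new count's parity, and count the substring if odd_count < 2.
def pvBodyA (st : Int × PySem.Dict Char Int × Int) (ch : Char) :
    Int × PySem.Dict Char Int × Int :=
  let res := st.1
  let cc := st.2.1
  let oc := st.2.2
  let cc := if cc.contains ch then cc else cc.insert ch 0
  let cc := cc.modify ch 0 (· + 1)
  let oc := if PySem.Int.mod (cc.getD ch 0) 2 == 0 then oc - 1 else oc + 1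
  let res := if oc < 2 then res + 1 else res
  (res, cc, oc)

-- reads word[j], then runs the body on that character
def pvInnerA (w : List Char) (st : Int × PySem.Dict Char Int × Int) (j : Int) :
    Int × PySem.Dict Char Int × Int :=
  pvBodyA st (PySem.List.pyGetD w j ' ')

def wonderfulSubstrings (word : String) : Int :=
  let w := word.toList
  let n : Int := PySem.Str.len word
  let final :=
    (PySem.List.pyRange 0 n 1).foldl
      (fun (st : Int × PySem.Dict Char Int × Int) i =>
        let origCC := st.2.1
        let inner := (PySem.List.pyRange i n 1).foldl (pvInnerA w) st
        (inner.1, origCC, 0))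
      (0, PySem.Dict.empty, 0)
  final.1


-- ===== PORT B =====
-- B's loop body: xor the char's bit into the running mask, add the stored counts of the mask
-- and of every mask one alphabet-bit away, then record the new mask in the hashmap.
def pvStepB (alphabet : PySem.Set Char) (st : PySem.Dict Nat Int × Nat × Int) (ch : Char) :
    PySem.Dict Nat Int × Nat × Int :=
  let counts := st.1
  let mask := st.2.1 ^^^ (1 <<< ch.toNat)
  let res := st.2.2 + counts.getD mask 0
  let res := alphabet.foldl (fun r c => r + counts.getD (mask ^^^ (1 <<< c.toNat)) 0) res
  let counts := counts.insert mask (counts.getD mask 0 + 1)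
  (counts, mask, res)

def wonderfulSubstrings_alt (word : String) : Int :=
  let w := word.toList
  let alphabet : PySem.Set Char := PySem.Set.ofList w
  let final := w.foldl (pvStepB alphabet) (PySem.Dict.empty.insert 0 1, 0, 0)
  final.2.2


-- ===== PRECONDITION & SPEC =====
def Spec_wonderfulSubstrings (word : String) (out : Int) : Prop := out = wonderfulSubstrings_alt word
instance (word : String) (out : Int) : Decidable (Spec_wonderfulSubstrings word out) := by unfold Spec_wonderfulSubstrings; infer_instance

-- ===== CLAIM (what is proved, stated in full; the proofs are below) =====
def Claim_equal_wonderfulSubstrings : Prop := ∀ (word : String), Dom_wonderfulSubstrings word → Spec_wonderfulSubstrings word (wonderfulSubstrings word)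

-- ===== LEMMAS AND PROOFS =====
-- prefix parity bitmask: the value of B's `mask` after a prefix
def pvPM (l : List Char) : Nat := l.foldl (fun m c => m ^^^ (1 <<< c.toNat)) 0
-- occurrences in l of the character with code b
def pvPcnt (l : List Char) (b : Nat) : Nat := l.countP (fun c => c.toNat == b)
-- does character code b occur an odd number of times in l?
def pvOdd (l : List Char) (b : Nat) : Bool := pvPcnt l b % 2 == 1
-- the set of character codes with odd count in l (whose size A's odd_count tracks)
def pvOB (l : List Char) : Finset Nat :=
  (l.map Char.toNat).toFinset.filter (fun b => pvOdd l b = true)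
-- "substring w[j:k] is wonderful": at most one character with an odd count
def pvGood (w : List Char) (j k : Nat) : Bool := decide ((pvOB ((w.take k).drop j)).card ≤ 1)
-- A's per-start count: wonderful substrings starting at i (ending at k ∈ (i, n])
def pvRow (w : List Char) (i : Nat) : Nat :=
  (List.range' (i+1) (w.length - i)).countP (fun k => pvGood w i k)
-- B's per-end count: wonderful substrings ending at k (starting at j ∈ [0, k))
def pvCol (w : List Char) (k : Nat) : Nat :=
  (List.range k).countP (fun j => pvGood w j k)
-- the prefix masks of all prefixes of p
def pvPMs (p : List Char) : List Nat := (List.range (p.length+1)).map (fun j => pvPM (p.take j))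
-- wonderful substrings of w ending at position ≤ L
def pvPairs (w : List Char) (L : Nat) : Nat := ((List.range (L+1)).map (pvCol w)).sum
theorem pv_toNat_inj {a b : Char} (h : a.toNat = b.toNat) : a = b := by
  apply Char.ext
  unfold Char.toNat at h
  exact UInt32.toNat_inj.mp h
theorem pvPcnt_append (l₁ l₂ : List Char) (b : Nat) :
    pvPcnt (l₁ ++ l₂) b = pvPcnt l₁ b + pvPcnt l₂ b := List.countP_append ..
theorem pvPcnt_count (l : List Char) (c : Char) : pvPcnt l c.toNat = l.count c := by
  unfold pvPcnt List.count
  apply List.countP_congr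
  intro x _
  constructor
  · intro h; exact beq_iff_eq.mpr (pv_toNat_inj (by simpa using h))
  · intro h; simp [beq_iff_eq.mp h]
theorem pv_parity_add (m n : Nat) : ((m + n) % 2 == 1) = (((m % 2 == 1)).xor ((n % 2 == 1))) := by
  rcases Nat.mod_two_eq_zero_or_one m with h|h <;> rcases Nat.mod_two_eq_zero_or_one n with h2|h2 <;>
    simp [Nat.add_mod, h, h2]
theorem pvOdd_cons (c : Char) (l : List Char) (b : Nat) :
    pvOdd (c :: l) b = ((decide (c.toNat = b)).xor (pvOdd l b)) := by
  unfold pvOdd pvPcnt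
  rw [List.countP_cons, pv_parity_add]
  by_cases h : c.toNat = b <;> simp [h]
theorem pvPM_foldl_testBit : ∀ (l : List Char) (m : Nat) (b : Nat),
    (l.foldl (fun m c => m ^^^ (1 <<< c.toNat)) m).testBit b = ((m.testBit b).xor (pvOdd l b)) := by
  intro l
  induction l with
  | nil => intro m b; simp [pvOdd, pvPcnt]
  | cons c l ih =>
    intro m b
    rw [List.foldl_cons, ih, pvOdd_cons]
    rw [Nat.one_shiftLeft, Nat.testBit_xor, Nat.testBit_two_pow]
    by_cases h : c.toNat = b <;> simp [h, Bool.xor_comm]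
theorem pvPM_testBit (l : List Char) (b : Nat) : (pvPM l).testBit b = pvOdd l b := by
  simpa using pvPM_foldl_testBit l 0 b
theorem pvPM_eq_iff (l₁ l₂ : List Char) :
    pvPM l₁ = pvPM l₂ ↔ ∀ b, pvOdd l₁ b = pvOdd l₂ b := by
  constructor
  · intro h b; rw [← pvPM_testBit, ← pvPM_testBit, h]
  · intro h
    apply Nat.eq_of_testBit_eq
    intro b; rw [pvPM_testBit, pvPM_testBit, h]
theorem pvPM_xor_iff (l₁ l₂ : List Char) (a : Nat) :
    pvPM l₁ = pvPM l₂ ^^^ (1 <<< a) ↔ ∀ b, pvOdd l₁ b = ((pvOdd l₂ b).xor (decide (a = b))) := by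
  constructor
  · intro h b
    rw [← pvPM_testBit, ← pvPM_testBit, h, Nat.testBit_xor, Nat.one_shiftLeft, Nat.testBit_two_pow]
  · intro h
    apply Nat.eq_of_testBit_eq
    intro b
    rw [pvPM_testBit, Nat.testBit_xor, Nat.one_shiftLeft, Nat.testBit_two_pow, pvPM_testBit, h]
theorem mem_pvOB (l : List Char) (b : Nat) : b ∈ pvOB l ↔ pvOdd l b = true := by
  unfold pvOB
  rw [Finset.mem_filter]
  constructor
  · intro h; exact h.2
  · intro h
    refine ⟨?_, h⟩
    have hpos : 0 < pvPcnt l b := by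
      by_contra hz
      have : pvPcnt l b = 0 := by omega
      simp [pvOdd, this] at h
    obtain ⟨c, hc, hcb⟩ := List.countP_pos_iff.mp hpos
    simp only [List.mem_toFinset, List.mem_map]
    exact ⟨c, hc, by simpa using hcb⟩
theorem pvOB_card_le_one (l : List Char) :
    (pvOB l).card ≤ 1 ↔ ((∀ b, pvOdd l b = false) ∨ ∃ a, pvOdd l a = true ∧ ∀ b, b ≠ a → pvOdd l b = false) := by
  constructor
  · intro h
    rcases Finset.card_le_one_iff_subset_singleton.mp h with ⟨a, ha⟩
    by_cases hmem : a ∈ pvOB l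
    · right
      refine ⟨a, (mem_pvOB l a).mp hmem, ?_⟩
      intro b hb
      by_contra hbt
      have : b ∈ pvOB l := (mem_pvOB l b).mpr (by simpa using hbt)
      have := ha this
      simp at this
      exact hb this
    · left
      intro b
      by_contra hbt
      have hbmem : b ∈ pvOB l := (mem_pvOB l b).mpr (by simpa using hbt)
      have := ha hbmem
      simp at this
      subst this
      exact hmem hbmem
  · intro h
    rcases h with h | ⟨a, _, ha⟩
    · have : pvOB l = ∅ := by
        apply Finset.eq_empty_of_forall_notMem
        intro b hb
        have := (mem_pvOB l b).mp hb
        simp [h b] at this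
      simp [this]
    · apply Finset.card_le_one_iff_subset_singleton.mpr
      refine ⟨a, ?_⟩
      intro b hb
      have hbt := (mem_pvOB l b).mp hb
      simp only [Finset.mem_singleton]
      by_contra hne
      simp [ha b hne] at hbt
theorem pv_take_split {w : List Char} {j k : Nat} (h : j ≤ k) :
    w.take k = w.take j ++ (w.take k).drop j := by
  have h2 := List.take_append_drop j (w.take k)
  rw [List.take_take, Nat.min_eq_left h] at h2
  exact h2.symm
theorem pvOdd_slice {w : List Char} {j k : Nat} (h : j ≤ k) (b : Nat) :
    pvOdd ((w.take k).drop j) b = ((pvOdd (w.take k) b).xor (pvOdd (w.take j) b)) := by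
  have hsplit := pv_take_split (w := w) h
  have : pvPcnt (w.take k) b = pvPcnt (w.take j) b + pvPcnt ((w.take k).drop j) b := by
    conv_lhs => rw [hsplit]
    exact pvPcnt_append ..
  unfold pvOdd
  rw [this, pv_parity_add]
  cases hpj : (pvPcnt (w.take j) b % 2 == 1) <;> simp
theorem pvGood_iff {w : List Char} {j k : Nat} (hjk : j ≤ k) :
    pvGood w j k = true ↔
      (pvPM (w.take j) = pvPM (w.take k) ∨
       ∃ c ∈ w, pvPM (w.take j) = pvPM (w.take k) ^^^ (1 <<< c.toNat)) := by
  unfold pvGood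
  rw [decide_eq_true_iff, pvOB_card_le_one]
  constructor
  · intro h
    rcases h with h | ⟨a, ha, hrest⟩
    · left
      rw [pvPM_eq_iff]
      intro b
      have := h b
      rw [pvOdd_slice hjk] at this
      cases h1 : pvOdd (w.take k) b <;> cases h2 : pvOdd (w.take j) b <;> simp [h1, h2] at this ⊢
    · right
      -- the odd bit a is the code of some character of the slice, hence of w
      have hmem : a ∈ pvOB ((w.take k).drop j) := (mem_pvOB _ a).mpr ha
      have : a ∈ ((w.take k).drop j).map Char.toNat := by
        have := (Finset.mem_filter.mp hmem).1
        simpa using this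
      obtain ⟨c, hc, hca⟩ := List.mem_map.mp this
      have hcw : c ∈ w := (List.take_subset k w) (List.drop_subset j _ hc)
      refine ⟨c, hcw, ?_⟩
      rw [pvPM_xor_iff]
      intro b
      rw [hca]
      by_cases hb : b = a
      · subst hb
        have := ha
        rw [pvOdd_slice hjk] at this
        cases h1 : pvOdd (w.take k) b <;> simp [h1] at this ⊢ <;> simp [this]
      · have := hrest b hb
        rw [pvOdd_slice hjk] at this
        have hba : ¬ a = b := fun hh => hb hh.symm
        cases h1 : pvOdd (w.take k) b <;> simp [h1, hba] at this ⊢ <;> simp [this]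
  · intro h
    rcases h with h | ⟨c, _, hc⟩
    · left
      intro b
      rw [pvOdd_slice hjk]
      have := (pvPM_eq_iff _ _).mp h b
      simp [this]
    · right
      refine ⟨c.toNat, ?_, ?_⟩
      · have := (pvPM_xor_iff _ _ _).mp hc c.toNat
        rw [pvOdd_slice hjk, this]
        cases h1 : pvOdd (w.take k) c.toNat <;> simp
      · intro b hb
        have := (pvPM_xor_iff _ _ _).mp hc b
        rw [pvOdd_slice hjk, this]
        have : ¬ c.toNat = b := fun hh => hb (by omega)
        cases h1 : pvOdd (w.take k) b <;> simp [*]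

-- ===== A-side =====
theorem pvOdd_append_singleton (p : List Char) (c : Char) (b : Nat) :
    pvOdd (p ++ [c]) b = ((pvOdd p b).xor (decide (c.toNat = b))) := by
  unfold pvOdd
  rw [pvPcnt_append, pv_parity_add]
  unfold pvPcnt
  by_cases h : c.toNat = b <;> simp [h]
theorem pvOB_append_singleton (p : List Char) (c : Char) :
    pvOB (p ++ [c]) = if c.toNat ∈ pvOB p then (pvOB p).erase c.toNat
                      else insert c.toNat (pvOB p) := by
  ext b
  rw [mem_pvOB, pvOdd_append_singleton]
  by_cases hb : b = c.toNat
  · subst hb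
    by_cases hm : c.toNat ∈ pvOB p
    · have h1 : pvOdd p c.toNat = true := (mem_pvOB p c.toNat).mp hm
      simp [hm, h1]
    · have h1 : pvOdd p c.toNat = false := by
        cases h : pvOdd p c.toNat
        · rfl
        · exact absurd ((mem_pvOB p c.toNat).mpr h) hm
      simp [hm, h1]
  · have hcb : ¬ (c.toNat = b) := fun hh => hb hh.symm
    by_cases hm : c.toNat ∈ pvOB p <;> simp [hm, hcb, hb, mem_pvOB]
theorem pvOB_card_append (p : List Char) (c : Char) :
    (pvOB (p ++ [c])).card
      = if c.toNat ∈ pvOB p then (pvOB p).card - 1 else (pvOB p).card + 1 := by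
  rw [pvOB_append_singleton]
  by_cases hm : c.toNat ∈ pvOB p <;> simp [hm, Finset.card_erase_of_mem, Finset.card_insert_of_notMem]

-- A counts, from a state that has processed the slice p, one substring per further character
-- what A's inner loop adds to res after having processed the slice p
def pvCG (p : List Char) : List Char → Nat
  | [] => 0
  | c :: t => ((if (pvOB (p ++ [c])).card ≤ 1 then 1 else 0) + pvCG (p ++ [c]) t)
theorem pv_dict_step (cc : PySem.Dict Char Int) (ch x : Char) :
    (((if cc.contains ch then cc else cc.insert ch 0).modify ch 0 (· + 1)).getD x 0)
      = cc.getD x 0 + (if x = ch then 1 else 0) := by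
  by_cases hc : cc.contains ch
  · rw [if_pos hc, PySem.Dict.getD_modify]
    by_cases hx : x = ch <;> simp [hx]
  · rw [if_neg hc, PySem.Dict.getD_modify]
    have h0 : cc.getD ch 0 = 0 := PySem.Dict.getD_of_not_contains cc 0 (by simpa using hc)
    by_cases hx : x = ch
    · subst hx; simp [h0]
    · simp [hx, PySem.Dict.getD_insert]
theorem pvBodyA_step (p : List Char) (res : Int) (cc : PySem.Dict Char Int) (c : Char)
    (hcc : ∀ x, cc.getD x 0 = (p.count x : Int)) :
    pvBodyA (res, cc, ((pvOB p).card : Int)) c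
      = ((if (pvOB (p ++ [c])).card ≤ 1 then res + 1 else res),
         (if cc.contains c then cc else cc.insert c 0).modify c 0 (· + 1),
         ((pvOB (p ++ [c])).card : Int)) := by
  have hchv : (((if cc.contains c then cc else cc.insert c 0).modify c 0 (· + 1)).getD c 0)
      = ((p.count c + 1 : Nat) : Int) := by rw [pv_dict_step, hcc c]; push_cast; simp
  have hparity : (PySem.Int.mod (((if cc.contains c then cc else cc.insert c 0).modify c 0 (· + 1)).getD c 0) 2 == 0)
      = (pvOdd p c.toNat) := by
    rw [hchv]
    have h2 : ((2:Int)) = ((2:Nat):Int) := by norm_num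
    rw [h2, PySem.Int.mod_natCast]
    unfold pvOdd
    rw [pvPcnt_count]
    rcases Nat.mod_two_eq_zero_or_one (p.count c) with h | h <;> simp [Nat.add_mod, h]
  have hcard := pvOB_card_append p c
  simp only [pvBodyA, hparity]
  by_cases hm : c.toNat ∈ pvOB p
  · have hodd : pvOdd p c.toNat = true := (mem_pvOB p c.toNat).mp hm
    have hcard1 : 1 ≤ (pvOB p).card := Finset.card_pos.mpr ⟨c.toNat, hm⟩
    have hocnew : (((pvOB p).card : Nat) : Int) - 1 = (((pvOB (p ++ [c])).card : Nat) : Int) := by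
      rw [hcard, if_pos hm]
      push_cast [hcard1]
      omega
    rw [hodd]
    simp only [if_true, hocnew]
    congr 1
    apply if_congr ?_ rfl rfl
    rw [show ((2:Int)) = ((2:Nat):Int) from by norm_num, Nat.cast_lt]
    omega
  · have hodd : pvOdd p c.toNat = false := by
      cases h : pvOdd p c.toNat
      · rfl
      · exact absurd ((mem_pvOB p c.toNat).mpr h) hm
    have hocnew : (((pvOB p).card : Nat) : Int) + 1 = (((pvOB (p ++ [c])).card : Nat) : Int) := by
      rw [hcard, if_neg hm]
      push_cast
      omega
    rw [hodd]
    simp only [Bool.false_eq_true, if_false, hocnew]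
    congr 1
    apply if_congr ?_ rfl rfl
    rw [show ((2:Int)) = ((2:Nat):Int) from by norm_num, Nat.cast_lt]
    omega
theorem pv_innerA : ∀ (t p : List Char) (res : Int) (cc : PySem.Dict Char Int),
    (∀ x, cc.getD x 0 = (p.count x : Int)) →
    (t.foldl pvBodyA (res, cc, ((pvOB p).card : Int))).1 = res + (pvCG p t : Nat) := by
  intro t
  induction t with
  | nil => intro p res cc _; simp [pvCG]
  | cons c t ih =>
    intro p res cc hcc
    rw [List.foldl_cons, pvBodyA_step p res cc c hcc]
    have hgetD : ∀ x, (((if cc.contains c then cc else cc.insert c 0).modify c 0 (· + 1)).getD x 0)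
        = ((p ++ [c]).count x : Int) := by
      intro x
      rw [pv_dict_step, hcc x, List.count_append]
      by_cases hx : x = c
      · subst hx; simp
      · simp [hx, Ne.symm hx]
    rw [ih (p ++ [c]) _ _ hgetD]
    simp only [pvCG]
    split_ifs <;> push_cast <;> ring
theorem pvCG_eq (w : List Char) (i : Nat) : ∀ (fuel k : Nat), w.length - k = fuel → i ≤ k → k ≤ w.length →
    pvCG ((w.take k).drop i) (w.drop k)
      = (List.range' (k+1) (w.length - k)).countP (fun k' => pvGood w i k') := by
  intro fuel
  induction fuel with
  | zero =>
    intro k hf hik hkn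
    have hk : k = w.length := by omega
    subst hk
    simp [pvCG, List.drop_eq_nil_of_le]
  | succ fuel ih =>
    intro k hf hik hkn
    have hkl : k < w.length := by omega
    rw [List.drop_eq_getElem_cons hkl]
    have htake : (w.take (k+1)).drop i = ((w.take k).drop i) ++ [w[k]] := by
      rw [List.take_add_one, List.getElem?_eq_getElem hkl]
      simp only [Option.toList_some]
      rw [List.drop_append_of_le_length (by simp; omega)]
    show (if (pvOB (((w.take k).drop i) ++ [w[k]])).card ≤ 1 then 1 else 0)
        + pvCG (((w.take k).drop i) ++ [w[k]]) (w.drop (k+1)) = _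
    rw [← htake]
    have hrest := ih (k+1) (by omega) (by omega) (by omega)
    rw [hrest]
    have hrange : List.range' (k+1) (w.length - k) = (k+1) :: List.range' (k+2) (w.length - (k+1)) := by
      have : w.length - k = (w.length - (k+1)) + 1 := by omega
      rw [this, List.range'_succ]
    rw [hrange, List.countP_cons]
    have hcond : (pvGood w i (k+1)) = (if (pvOB ((w.take (k+1)).drop i)).card ≤ 1 then true else false) := by
      unfold pvGood
      by_cases h : (pvOB ((w.take (k+1)).drop i)).card ≤ 1 <;> simp [h]
    rw [hcond]
    by_cases h : (pvOB ((w.take (k+1)).drop i)).card ≤ 1 <;> simp [h, show k + 1 + 1 = k + 2 by omega] <;> omega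
theorem pv_outerA (w : List Char) : ∀ m, m ≤ w.length →
    ((List.range m).foldl
      (fun (st : Int × PySem.Dict Char Int × Int) (i : Nat) =>
        let origCC := st.2.1
        let inner := (PySem.List.pyRange (↑i) (↑w.length) 1).foldl (pvInnerA w) st
        (inner.1, origCC, 0))
      (0, PySem.Dict.empty, 0))
      = (((((List.range m).map (pvRow w)).sum : Nat) : Int), PySem.Dict.empty, (0:Int)) := by
  intro m
  induction m with
  | zero => simp
  | succ m ih =>
    intro hm
    rw [List.range_succ, List.foldl_append, ih (by omega), List.foldl_cons, List.foldl_nil]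
    have hinner : (PySem.List.pyRange (↑m) (↑w.length) 1).foldl (pvInnerA w)
        (((((List.range m).map (pvRow w)).sum : Nat) : Int), PySem.Dict.empty, (0:Int))
        = (w.drop m).foldl pvBodyA (((((List.range m).map (pvRow w)).sum : Nat) : Int), PySem.Dict.empty, (0:Int)) := by
      have := PySem.List.foldl_pyRange_pyGetD' w ' ' pvBodyA
        (((((List.range m).map (pvRow w)).sum : Nat) : Int), PySem.Dict.empty, (0:Int)) (a := (m:Int)) (by positivity)
      simpa [pvInnerA] using this
    have hOB : (0:Int) = (((pvOB []).card : Nat) : Int) := by simp [pvOB]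
    have hstart : ∀ x, (PySem.Dict.empty : PySem.Dict Char Int).getD x 0 = (List.count x ([] : List Char) : Int) := by
      intro x; simp [PySem.Dict.getD_empty]
    show (_, _, _) = _
    simp only [hinner]
    rw [show (((((List.range m).map (pvRow w)).sum : Nat) : Int), PySem.Dict.empty, (0:Int))
        = (((((List.range m).map (pvRow w)).sum : Nat) : Int), PySem.Dict.empty, (((pvOB ([] : List Char)).card : Nat) : Int)) from by rw [← hOB]]
    have h1 := pv_innerA (w.drop m) [] ((((List.range m).map (pvRow w)).sum : Nat) : Int) PySem.Dict.empty hstart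
    have hcg : pvCG ([] : List Char) (w.drop m) = pvRow w m := by
      have h2 := pvCG_eq w m (w.length - m) m rfl (le_refl m) (by omega)
      have h3 : (w.take m).drop m = ([] : List Char) := by
        rw [List.drop_take]
        simp
      rw [h3] at h2
      exact h2
    rw [List.map_append, List.sum_append]
    simp only [h1, hcg]
    push_cast
    simp
theorem wonderful_A_eq (word : String) :
    wonderfulSubstrings word = (((List.range word.toList.length).map (pvRow word.toList)).sum : Nat) := by
  simp only [wonderfulSubstrings]
  rw [PySem.Str.len_eq, PySem.List.pyRange_zero_nat, List.foldl_map]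
  rw [pv_outerA word.toList word.toList.length (le_refl _)]

-- ===== B-side =====
theorem pvPM_append_singleton (p : List Char) (c : Char) :
    pvPM (p ++ [c]) = pvPM p ^^^ (1 <<< c.toNat) := by
  unfold pvPM
  rw [List.foldl_append]
  rfl
theorem pv_bit_ne (x a : Nat) : ¬ x ^^^ (1 <<< a) = x := by
  intro hc
  have h0 : (1 <<< a : Nat) ≠ 0 := by
    rw [Nat.one_shiftLeft]
    positivity
  apply h0
  have : x ^^^ (1 <<< a) = x ^^^ 0 := by simpa using hc
  exact Nat.xor_right_inj.mp this
theorem pv_bit_inj {a b : Nat} (h : (1 <<< a : Nat) = 1 <<< b) : a = b := by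
  rw [Nat.one_shiftLeft, Nat.one_shiftLeft] at h
  exact Nat.pow_right_injective (by norm_num) h
theorem pv_countP_eq_one {α : Type} (l : List α) (p : α → Bool) (hnd : l.Nodup) {c : α}
    (hc : c ∈ l) (hpc : p c = true) (huniq : ∀ x ∈ l, p x = true → x = c) :
    l.countP p = 1 := by
  induction l with
  | nil => simp at hc
  | cons a l ih =>
    rw [List.countP_cons]
    rcases List.mem_cons.mp hc with h | h
    · subst h
      have hz : l.countP p = 0 := by
        rw [List.countP_eq_zero]
        intro x hx hpx
        have := huniq x (List.mem_cons_of_mem _ hx) hpx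
        subst this
        exact (List.nodup_cons.mp hnd).1 hx
      simp [hz, hpc]
    · have hpa : p a = false := by
        cases hpa : p a
        · rfl
        · have := huniq a List.mem_cons_self hpa
          subst this
          exact absurd h (List.nodup_cons.mp hnd).1
      rw [ih (List.nodup_cons.mp hnd).2 h (fun x hx hpx => huniq x (List.mem_cons_of_mem _ hx) hpx)]
      simp [hpa]
theorem pv_sum_map_add' {α : Type} (l : List α) (f g : α → Nat) :
    (l.map (fun i => f i + g i)).sum = (l.map f).sum + (l.map g).sum := by
  induction l with
  | nil => simp
  | cons x l ih => simp [ih]; omega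
theorem pv_sum_map_cast {α : Type} (al : List α) (f : α → Int) (g : α → Nat)
    (h : ∀ x ∈ al, f x = ((g x : Nat) : Int)) :
    (al.map f).sum = (((al.map g).sum : Nat) : Int) := by
  induction al with
  | nil => simp
  | cons a al ih =>
    simp only [List.map_cons, List.sum_cons]
    rw [h a List.mem_cons_self, ih (fun x hx => h x (List.mem_cons_of_mem _ hx))]
    push_cast
    ring
theorem pv_indicator (w : List Char) (j k : Nat) (hjk : j ≤ k) :
    (if pvGood w j k = true then (1:Nat) else 0)
      = (if pvPM (w.take j) == pvPM (w.take k) then 1 else 0)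
        + (PySem.Set.ofList w).countP
            (fun c => pvPM (w.take j) == pvPM (w.take k) ^^^ (1 <<< c.toNat)) := by
  by_cases heq : pvPM (w.take j) = pvPM (w.take k)
  · have hg : pvGood w j k = true := (pvGood_iff hjk).mpr (Or.inl heq)
    have hz : (PySem.Set.ofList w).countP
        (fun c => pvPM (w.take j) == pvPM (w.take k) ^^^ (1 <<< c.toNat)) = 0 := by
      rw [List.countP_eq_zero]
      intro c _ hpc
      have := eq_of_beq hpc
      rw [heq] at this
      exact pv_bit_ne _ _ this.symm
    rw [hz]
    simp [hg, heq]
  · by_cases hg : pvGood w j k = true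
    · rcases (pvGood_iff hjk).mp hg with h | ⟨c, hcw, hc⟩
      · exact absurd h heq
      · have h1 : (PySem.Set.ofList w).countP
            (fun x => pvPM (w.take j) == pvPM (w.take k) ^^^ (1 <<< x.toNat)) = 1 := by
          apply pv_countP_eq_one _ _ (PySem.Set.nodup_ofList w) ((PySem.Set.mem_ofList w c).mpr hcw)
            (by simpa using hc)
          intro x _ hpx
          have hx := eq_of_beq hpx
          rw [hc] at hx
          have := Nat.xor_right_inj.mp hx.symm
          have : x.toNat = c.toNat := pv_bit_inj this
          exact pv_toNat_inj this
        have hne : (pvPM (w.take j) == pvPM (w.take k)) = false := by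
          simpa using heq
        simp [hg, hne, h1]
    · have hz : (PySem.Set.ofList w).countP
          (fun c => pvPM (w.take j) == pvPM (w.take k) ^^^ (1 <<< c.toNat)) = 0 := by
        rw [List.countP_eq_zero]
        intro c hcal hpc
        apply hg
        exact (pvGood_iff hjk).mpr (Or.inr ⟨c, (PySem.Set.mem_ofList w c).mp hcal, eq_of_beq hpc⟩)
      have hne : (pvPM (w.take j) == pvPM (w.take k)) = false := by simpa using heq
      simp [hg, hne, hz]
theorem pv_count_split (w : List Char) (k : Nat) : ∀ js : List Nat, (∀ j ∈ js, j ≤ k) →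
    js.countP (fun j => pvGood w j k)
      = js.countP (fun j => pvPM (w.take j) == pvPM (w.take k))
        + ((PySem.Set.ofList w).map
            (fun c => js.countP (fun j => pvPM (w.take j) == pvPM (w.take k) ^^^ (1 <<< c.toNat)))).sum := by
  intro js
  induction js with
  | nil => simp
  | cons j js ih =>
    intro hmem
    have hj : j ≤ k := hmem j List.mem_cons_self
    have hrest := ih (fun x hx => hmem x (List.mem_cons_of_mem _ hx))
    simp only [List.countP_cons]
    have hsum : ((PySem.Set.ofList w).map
        (fun c => js.countP (fun j' => pvPM (w.take j') == pvPM (w.take k) ^^^ (1 <<< c.toNat))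
          + (if pvPM (w.take j) == pvPM (w.take k) ^^^ (1 <<< c.toNat) then 1 else 0))).sum
        = ((PySem.Set.ofList w).map
            (fun c => js.countP (fun j' => pvPM (w.take j') == pvPM (w.take k) ^^^ (1 <<< c.toNat)))).sum
          + (PySem.Set.ofList w).countP
              (fun c => pvPM (w.take j) == pvPM (w.take k) ^^^ (1 <<< c.toNat)) := by
      rw [pv_sum_map_add']
      rw [PySem.List.sum_map_ite_one_zero_nat]
    rw [hsum, hrest, pv_indicator w j k hj]
    ring
theorem pvPMs_count (p : List Char) (m : Nat) :
    (pvPMs p).count m = (List.range (p.length + 1)).countP (fun j => pvPM (p.take j) == m) := by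
  unfold pvPMs
  rw [List.count, List.countP_map]
  rfl
theorem pv_innerB (w : List Char) : ∀ (t p : List Char) (counts : PySem.Dict Nat Int) (res : Int),
    w = p ++ t →
    (∀ m, counts.getD m 0 = ((pvPMs p).count m : Int)) →
    res = ((pvPairs w p.length : Nat) : Int) →
    (t.foldl (pvStepB (PySem.Set.ofList w)) (counts, pvPM p, res)).2.2
      = ((pvPairs w w.length : Nat) : Int) := by
  intro t
  induction t with
  | nil =>
    intro p counts res hw _ hres
    subst hw
    simpa using hres
  | cons c t ih =>
    intro p counts res hw hcounts hres
    have hklen : p.length + 1 ≤ w.length := by subst hw; simp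
    have hwp' : w.take (p.length + 1) = p ++ [c] := by
      subst hw
      rw [List.take_append]
      simp
    have hwpj : ∀ j, j ≤ p.length → w.take j = p.take j := by
      intro j hj
      subst hw
      exact List.take_append_of_le_length hj
    rw [List.foldl_cons]
    have hmask : pvPM p ^^^ (1 <<< c.toNat) = pvPM (p ++ [c]) := (pvPM_append_singleton p c).symm
    set K := p.length + 1 with hK
    have htakeK : pvPM (p ++ [c]) = pvPM (w.take K) := by rw [hwp']
    have hcntK : ∀ m, counts.getD m 0
        = (((List.range K).countP (fun j => pvPM (w.take j) == m) : Nat) : Int) := by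
      intro m
      rw [hcounts m, pvPMs_count]
      congr 1
      apply List.countP_congr
      intro j hj
      rw [hwpj j (by have := List.mem_range.mp hj; omega)]
    -- the value added to res in this step is the number of wonderful substrings ending at K
    have hstep : pvStepB (PySem.Set.ofList w) (counts, pvPM p, res) c
        = (counts.insert (pvPM (p ++ [c])) (counts.getD (pvPM (p ++ [c])) 0 + 1),
           pvPM (p ++ [c]),
           res + ((pvCol w K : Nat) : Int)) := by
      simp only [pvStepB, hmask]
      rw [htakeK]
      congr 1
      congr 1
      rw [PySem.List.foldl_add]
      rw [hcntK (pvPM (w.take K))]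
      rw [pv_sum_map_cast (PySem.Set.ofList w) _
        (fun x => (List.range K).countP (fun j => pvPM (w.take j) == pvPM (w.take K) ^^^ (1 <<< x.toNat)))
        (fun x _ => hcntK _)]
      have hsplit := pv_count_split w K (List.range K)
        (fun j hj => by have := List.mem_range.mp hj; omega)
      unfold pvCol
      rw [hsplit]
      push_cast
      ring
    rw [hstep]
    have hw' : w = (p ++ [c]) ++ t := by simpa using hw
    have hlen' : (p ++ [c]).length = K := by simp [hK]
    have hcounts' : ∀ m, (counts.insert (pvPM (p ++ [c])) (counts.getD (pvPM (p ++ [c])) 0 + 1)).getD m 0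
        = ((pvPMs (p ++ [c])).count m : Int) := by
      intro m
      have hPMs' : pvPMs (p ++ [c]) = pvPMs p ++ [pvPM (p ++ [c])] := by
        unfold pvPMs
        rw [hlen', hK, List.range_succ, List.map_append]
        congr 1
        · apply List.map_congr_left
          intro j hj
          rw [List.take_append_of_le_length (by have := List.mem_range.mp hj; omega)]
        · simp [List.take_of_length_le]
      rw [PySem.Dict.getD_insert, hPMs', List.count_append]
      by_cases hm : m = pvPM (p ++ [c])
      · rw [if_pos hm, ← hm, hcounts m]
        have h1 : [m].count m = 1 := by simp
        rw [h1]
        push_cast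
        ring
      · rw [if_neg hm, hcounts m]
        have h0 : [pvPM (p ++ [c])].count m = 0 := by
          simp [List.count_singleton]
          exact fun hh => hm hh.symm
        rw [h0]
        simp
    have hpairs : (pvPairs w K : Nat) = pvPairs w p.length + pvCol w K := by
      unfold pvPairs
      rw [hK, List.range_succ, List.map_append, List.sum_append]
      simp
    have hres' : res + ((pvCol w K : Nat) : Int) = ((pvPairs w (p ++ [c]).length : Nat) : Int) := by
      rw [hres, hlen', hpairs]
      push_cast
      ring
    exact ih (p ++ [c]) _ _ hw' hcounts' hres'
theorem wonderful_B_eq (word : String) :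
    wonderfulSubstrings_alt word
      = (((List.range (word.toList.length + 1)).map (pvCol word.toList)).sum : Nat) := by
  simp only [wonderfulSubstrings_alt]
  have h := pv_innerB word.toList word.toList [] (PySem.Dict.empty.insert 0 1) 0
    (by simp)
    (by
      intro m
      rw [PySem.Dict.getD_insert]
      have hPMs : pvPMs ([] : List Char) = [0] := rfl
      rw [hPMs]
      by_cases hm : m = 0
      · simp [hm]
      · simp [hm, List.count_singleton]
        exact fun hh => hm hh.symm)
    (by simp [pvPairs, pvCol])
  have h0 : pvPM ([] : List Char) = 0 := rfl
  rw [h0] at h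
  rw [h]
  rfl
theorem pv_sum_map_add (l : List Nat) (f g : Nat → Nat) :
    (l.map (fun i => f i + g i)).sum = (l.map f).sum + (l.map g).sum := by
  induction l with
  | nil => simp
  | cons x l ih => simp [ih]; omega
theorem pv_swap : ∀ (n : Nat) (g : Nat → Nat → Bool),
    ((List.range n).map (fun i => (List.range' (i+1) (n-i)).countP (g i))).sum
      = ((List.range (n+1)).map (fun k => (List.range k).countP (fun j => g j k))).sum := by
  intro n g
  induction n with
  | zero => simp [List.range_succ]
  | succ n ih =>
    have hrow : ∀ i ∈ List.range n,
        (List.range' (i+1) (n+1-i)).countP (g i)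
          = (List.range' (i+1) (n-i)).countP (g i) + (if g i (n+1) then 1 else 0) := by
      intro i hi
      have hin : i < n := List.mem_range.mp hi
      have h1 : n+1-i = (n-i)+1 := by omega
      have h2 : List.range' (i+1) ((n-i)+1) = List.range' (i+1) (n-i) ++ [n+1] := by
        have := List.range'_concat (s := i+1) (n := n-i) (step := 1)
        rw [show i+1+1*(n-i) = n+1 by omega] at this; simpa using this
      rw [h1, h2, List.countP_append]
      simp [List.countP_cons]
    calc ((List.range (n+1)).map (fun i => (List.range' (i+1) (n+1-i)).countP (g i))).sum
        = ((List.range n).map (fun i => (List.range' (i+1) (n+1-i)).countP (g i))).sum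
            + (List.range' (n+1) 1).countP (g n) := by
          rw [List.range_succ]; simp
      _ = ((List.range n).map (fun i => (List.range' (i+1) (n-i)).countP (g i) + (if g i (n+1) then 1 else 0))).sum
            + (if g n (n+1) then 1 else 0) := by
          rw [List.map_congr_left hrow]
          simp [List.range'_one, List.countP_cons]
      _ = ((List.range n).map (fun i => (List.range' (i+1) (n-i)).countP (g i))).sum
            + ((List.range (n+1)).map (fun i => if g i (n+1) then 1 else 0)).sum := by
          rw [pv_sum_map_add]
          rw [List.range_succ]
          simp; omega
      _ = ((List.range (n+1)).map (fun k => (List.range k).countP (fun j => g j k))).sum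
            + (List.range (n+1)).countP (fun j => g j (n+1)) := by
          rw [ih, PySem.List.sum_map_ite_one_zero_nat]
      _ = ((List.range (n+1+1)).map (fun k => (List.range k).countP (fun j => g j k))).sum := by
          rw [List.range_succ (n := n+1)]
          simp
-- ===== VERDICT (by name: the statement is the Claim_ definition above) =====
theorem wonderfulSubstrings_spec : Claim_equal_wonderfulSubstrings := by
  intro word _
  show _ = _
  rw [wonderful_A_eq, wonderful_B_eq]
  norm_cast
  simpa [pvRow, pvCol] using pv_swap word.toList.length (fun j k => pvGood word.toList j k)
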